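-- pv_equiv track=rewrite | github.com/hygj10/dou-dizhu | Doudizhu_Roles.py | isChain
-- ===== SOURCE A (Python) =====
-- def isChain (yourcardlist):
--     if len(yourcardlist) < 5:
--         return False
--     if yourcardlist[-1] > 14:
--         return False
--     for i in range((len(yourcardlist)) - 1):
--         if yourcardlist[i] != yourcardlist[i + 1] - 1:
--             return False
--     return True
-- ===== SOURCE B (Python) =====
-- def isChain(yourcardlist):
--     n = len(yourcardlist)
--     if n < 5 or yourcardlist[-1] > 14:
--         return False
--     return (yourcardlist == sorted(set(yourcardlist))
--             and yourcardlist[-1] - yourcardlist[0] == n - 1)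
-- ===== Notes on version B (the rewrite author's own statement) =====
-- stated objective: alternative
-- what changed: Replaces the adjacent-difference loop with a set/sort pigeonhole argument: the list is a chain iff it equals sorted(set(itself)) (i.e. it is strictly increasing with no duplicates) and its span last-first equals len-1.
import Mathlib
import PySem

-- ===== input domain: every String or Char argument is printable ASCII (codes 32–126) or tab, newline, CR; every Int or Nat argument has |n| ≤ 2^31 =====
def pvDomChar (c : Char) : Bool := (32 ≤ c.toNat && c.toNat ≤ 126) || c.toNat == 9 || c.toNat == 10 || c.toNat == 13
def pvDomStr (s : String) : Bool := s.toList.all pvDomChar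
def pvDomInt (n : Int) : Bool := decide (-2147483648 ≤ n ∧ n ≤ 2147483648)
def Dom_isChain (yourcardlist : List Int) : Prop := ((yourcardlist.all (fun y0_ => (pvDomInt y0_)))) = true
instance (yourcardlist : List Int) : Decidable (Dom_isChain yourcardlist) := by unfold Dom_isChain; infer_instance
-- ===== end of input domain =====

-- B: instead of the adjacent-difference loop, uses a set/sort pigeonhole test:
-- a chain iff the list equals sorted(set(itself)) and its span last-first is len-1.
-- ===== PORT A =====
def isChain (yourcardlist : List Int) : Bool :=
  if yourcardlist.length < 5 then false
  else if PySem.List.pyGetD yourcardlist (-1) 0 > 14 then false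
  else (PySem.List.pyRange 0 ((yourcardlist.length : Int) - 1) 1).all
        (fun i => PySem.List.pyGetD yourcardlist i 0 == PySem.List.pyGetD yourcardlist (i + 1) 0 - 1)

-- ===== PORT B =====
def isChain_alt (yourcardlist : List Int) : Bool :=
  let n := yourcardlist.length
  if n < 5 || PySem.List.pyGetD yourcardlist (-1) 0 > 14 then false
  else
    decide (yourcardlist = PySem.List.sorted (PySem.Set.ofList yourcardlist) (fun x => x) false) &&
    decide (PySem.List.pyGetD yourcardlist (-1) 0 - PySem.List.pyGetD yourcardlist 0 0 = (n : Int) - 1)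

-- ===== PRECONDITION & SPEC =====
def Spec_isChain (yourcardlist : List Int) (out : Bool) : Prop := out = isChain_alt yourcardlist
instance (yourcardlist : List Int) (out : Bool) : Decidable (Spec_isChain yourcardlist out) := by unfold Spec_isChain; infer_instance

-- ===== CLAIM (what is proved, stated in full; the proofs are below) =====
def Claim_equal_isChain : Prop := ∀ (yourcardlist : List Int), Dom_isChain yourcardlist → Spec_isChain yourcardlist (isChain yourcardlist)

-- ===== LEMMAS AND PROOFS =====
-- adjacent-step condition (A's loop, in index form)
def PA (xs : List Int) : Prop := ∀ k : Nat, k + 1 < xs.length → xs.getD k 0 + 1 = xs.getD (k + 1) 0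
-- offset-from-start condition
def PB (xs : List Int) : Prop := ∀ k : Nat, k < xs.length → xs.getD k 0 = xs.getD 0 0 + k

lemma PA_iff_PB (xs : List Int) : PA xs ↔ PB xs := by
  constructor
  · intro h k hk
    induction k with
    | zero => simp
    | succ n ih =>
      have := h n (by omega)
      have := ih (by omega)
      push_cast
      omega
  · intro h k hk
    have h1 := h k (by omega)
    have h2 := h (k + 1) hk
    push_cast at h2
    omega

lemma A_all_iff (xs : List Int) :
    ((PySem.List.pyRange 0 ((xs.length : Int) - 1) 1).all
        (fun i => PySem.List.pyGetD xs i 0 == PySem.List.pyGetD xs (i + 1) 0 - 1) = true) ↔ PA xs := by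
  rw [List.all_eq_true]
  constructor
  · intro h k hk
    have hm : (k : Int) ∈ PySem.List.pyRange 0 ((xs.length : Int) - 1) 1 := by
      rw [PySem.List.mem_pyRange_one]; omega
    have := h _ hm
    simp only [beq_iff_eq] at this
    have e1 : PySem.List.pyGetD xs (k : Int) 0 = xs.getD k 0 := PySem.List.pyGetD_natCast xs k 0
    have e2 : PySem.List.pyGetD xs ((k : Int) + 1) 0 = xs.getD (k + 1) 0 := by
      have := PySem.List.pyGetD_natCast xs (k + 1) 0
      push_cast at this
      exact this
    rw [e1, e2] at this
    omega
  · intro h i hi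
    rw [PySem.List.mem_pyRange_one] at hi
    have hk : i = ((i.toNat : Nat) : Int) := by omega
    simp only [beq_iff_eq]
    have e1 : PySem.List.pyGetD xs ((i.toNat : Nat) : Int) 0 = xs.getD i.toNat 0 := PySem.List.pyGetD_natCast xs i.toNat 0
    have e2 : PySem.List.pyGetD xs (((i.toNat : Nat) : Int) + 1) 0 = xs.getD (i.toNat + 1) 0 := by
      have := PySem.List.pyGetD_natCast xs (i.toNat + 1) 0
      push_cast at this
      exact this
    rw [hk, e1, e2]
    have := h i.toNat (by omega)
    omega

-- in a strictly increasing integer list, indices d apart differ by at least d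
lemma gap_ge (xs : List Int) (h : xs.Pairwise (· < ·)) :
    ∀ d k : Nat, k + d < xs.length → xs.getD k 0 + d ≤ xs.getD (k + d) 0 := by
  intro d
  induction d with
  | zero => intro k hk; simp
  | succ n ih =>
    intro k hk
    have h1 := ih k (by omega)
    have h2 : xs.getD (k + n) 0 < xs.getD (k + n + 1) 0 := by
      rw [List.pairwise_iff_getElem] at h
      have := h (k + n) (k + n + 1) (by omega) (by omega) (by omega)
      have e1 : xs.getD (k + n) 0 = xs[k + n] := by
        simp [List.getD_eq_getElem?_getD, List.getElem?_eq_getElem (by omega : k + n < xs.length)]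
      have e2 : xs.getD (k + n + 1) 0 = xs[k + n + 1] := by
        simp [List.getD_eq_getElem?_getD, List.getElem?_eq_getElem (by omega : k + n + 1 < xs.length)]
      omega
    have e3 : k + (n + 1) = k + n + 1 := by omega
    rw [e3]
    push_cast
    omega

lemma pairwise_of_PB (xs : List Int) (h : PB xs) : xs.Pairwise (· < ·) := by
  rw [List.pairwise_iff_getElem]
  intro i j hi hj hij
  have h1 := h i (by omega)
  have h2 := h j hj
  have e1 : xs.getD i 0 = xs[i] := by simp [List.getD_eq_getElem?_getD, List.getElem?_eq_getElem hi]
  have e2 : xs.getD j 0 = xs[j] := by simp [List.getD_eq_getElem?_getD, List.getElem?_eq_getElem hj]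
  rw [e1] at h1; rw [e2] at h2
  have : (i : Int) < (j : Int) := by exact_mod_cast hij
  omega

lemma perm_ofList_of_nodup (xs : List Int) (h : xs.Nodup) : xs.Perm (PySem.Set.ofList xs) := by
  apply (List.perm_ext_iff_of_nodup h (PySem.Set.nodup_ofList xs)).mpr
  intro a
  rw [PySem.Set.mem_ofList]

-- B's two tests together are exactly PB (for nonempty xs)
lemma B_iff_PB (xs : List Int) (hne : 0 < xs.length) :
    (xs = PySem.List.sorted (PySem.Set.ofList xs) (fun x => x) false ∧
      xs.getD (xs.length - 1) 0 - xs.getD 0 0 = (xs.length : Int) - 1) ↔ PB xs := by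
  constructor
  · rintro ⟨hsort, hspan⟩
    have hlt : xs.Pairwise (· < ·) := by
      rw [hsort]; exact PySem.List.sorted_ofList_pairwise_lt xs
    -- lower bounds from strictness
    intro k hk
    have hlow := gap_ge xs hlt k 0 (by omega)
    have hhigh := gap_ge xs hlt (xs.length - 1 - k) k (by omega)
    simp only [Nat.zero_add] at hlow
    have : k + (xs.length - 1 - k) = xs.length - 1 := by omega
    rw [this] at hhigh
    have hc : ((xs.length - 1 - k : Nat) : Int) = (xs.length : Int) - 1 - k := by omega
    rw [hc] at hhigh
    omega
  · intro h
    have hlt := pairwise_of_PB xs h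
    constructor
    · exact (PySem.List.sorted_eq_of_perm_of_pairwise_lt _ _ (fun x => x)
        (perm_ofList_of_nodup xs hlt.nodup) hlt).symm
    · have h1 := h (xs.length - 1) (by omega)
      have h2 := h 0 hne
      rw [h1, h2]
      omega

lemma pyGetD_last (xs : List Int) (hne : 0 < xs.length) :
    PySem.List.pyGetD xs (-1) 0 = xs.getD (xs.length - 1) 0 := by
  have := PySem.List.pyGet?_neg_natCast xs (k := 1) (by omega) (by omega)
  simp only [PySem.List.pyGetD, Int.reduceNeg] at *
  rw [show (-1 : Int) = -((1 : Nat) : Int) by norm_num, this]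
  simp [List.getD_eq_getElem?_getD]

lemma ports_agree (xs : List Int) : isChain xs = isChain_alt xs := by
  unfold isChain isChain_alt
  by_cases h5 : xs.length < 5
  · simp [h5]
  · by_cases hlast : PySem.List.pyGetD xs (-1) 0 > 14
    · simp [h5, hlast]
    · rw [if_neg h5, if_neg hlast,
        if_neg (by simp [h5, hlast] : ¬ (decide (xs.length < 5) || decide (PySem.List.pyGetD xs (-1) 0 > 14)) = true)]
      have hne : 0 < xs.length := by omega
      rw [Bool.eq_iff_iff]
      rw [A_all_iff, PA_iff_PB]
      rw [Bool.and_eq_true, decide_eq_true_iff, decide_eq_true_iff]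
      rw [pyGetD_last xs hne]
      have e0 : PySem.List.pyGetD xs 0 0 = xs.getD 0 0 := PySem.List.pyGetD_natCast xs 0 0
      rw [e0]
      exact (B_iff_PB xs hne).symm

-- ===== VERDICT (by name: the statement is the Claim_ definition above) =====
theorem isChain_spec : Claim_equal_isChain := by
  intro xs _
  unfold Spec_isChain
  exact ports_agree xs
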